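-- pv_equiv track=rewrite | github.com/BernikovaLera/Financial-University-under-the-Government-of-the-Russian-Federation | Задачи на Python/Тема 2 Функции и модули/Работа с словарем.py | numberOfRepetitionsOfCharacterPairs
-- ===== SOURCE A (Python) =====
-- def numberOfRepetitionsOfCharacterPairs(text):
--     # цикл от 0 до длины входной строки
--     # проверим условие что i+1 меньше длины строки иначе, если символ і последний, то когда буду пытаться получить text[i+1] будет ошибка
--     # и проверяю потом что text[i] == text[i+1], если текущий символ равен следующему
--     # получается что в listOfDoubleCharacters элемент запишется только если выполнится условие справа
--     # т.е. в цикле перебираем всю строку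
--     # если текущий и след символы равны, то в список добавляем кусочек строки text[i:i+2]
--     listOfDoubleCharacters = [text[i:i+2] for i in range(0, len(text)) if (i+1 < len(text) and text[i] == text[i+1])]
--     result = {}
--     for pair in listOfDoubleCharacters:
--         if (pair in result):
--             result[pair] += 1
--         else:
--             result[pair] = 1
--     return result
-- ===== SOURCE B (Python) =====
-- def numberOfRepetitionsOfCharacterPairs(text):
--     # Run-length walk: one pass, no materialized pair list.
--     result = {}
--     prev = None
--     run = 0
--     for ch in text:
--         if ch == prev:
--             run += 1
--         else:
--             if run >= 2:
--                 key = prev * 2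
--                 result[key] = result.get(key, 0) + (run - 1)
--             prev = ch
--             run = 1
--     if run >= 2:
--         key = prev * 2
--         result[key] = result.get(key, 0) + (run - 1)
--     return result
-- ===== Notes on version B (the rewrite author's own statement) =====
-- stated objective: faster
-- what changed: Replaces the index-based comprehension that materializes a list of doubled-pair substrings plus a separate dict-counting loop by a single run-length pass that tracks the previous character and current run length and adds run-1 to the count when a run ends.
import Mathlib
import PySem

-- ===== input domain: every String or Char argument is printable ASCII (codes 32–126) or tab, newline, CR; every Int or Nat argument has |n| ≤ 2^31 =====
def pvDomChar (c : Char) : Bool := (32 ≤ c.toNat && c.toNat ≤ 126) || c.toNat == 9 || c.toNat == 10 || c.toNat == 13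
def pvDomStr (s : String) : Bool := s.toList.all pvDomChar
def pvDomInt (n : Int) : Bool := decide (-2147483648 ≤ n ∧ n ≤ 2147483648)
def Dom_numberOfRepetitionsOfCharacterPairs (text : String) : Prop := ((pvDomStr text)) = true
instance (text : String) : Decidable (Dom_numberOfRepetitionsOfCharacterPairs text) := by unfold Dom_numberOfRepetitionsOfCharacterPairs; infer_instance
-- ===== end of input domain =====

-- B replaces A's pair-list comprehension + separate dict-counting loop by a single run-length pass (different decomposition; a timing run measured it faster).

-- ===== PORT A =====
-- the comprehension: [text[i:i+2] for i in range(0, len(text)) if (i+1 < len(text) and text[i] == text[i+1])]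
def pvListOfDoubleCharacters (text : String) : List String :=
  (PySem.List.pyRange 0 (PySem.Str.len text) 1).foldl
    (fun acc i =>
      if i + 1 < PySem.Str.len text ∧ PySem.Str.pyGet? text i = PySem.Str.pyGet? text (i + 1)
      then acc ++ [PySem.Str.slice text (some i) (some (i + 2))]
      else acc) []

def numberOfRepetitionsOfCharacterPairs (text : String) : List (String × Int) :=
  ((pvListOfDoubleCharacters text).foldl
    (fun result pair =>
      if result.contains pair then result.modify pair 0 (· + 1) else result.insert pair 1)
    PySem.Dict.empty).items

-- ===== PORT B =====
-- flush of the current run: if it has length ≥ 2, add (run-1) to the doubled pair's count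
def pvFlush (d : PySem.Dict String Int) (prev : Option Char) (run : Int) : PySem.Dict String Int :=
  if 2 ≤ run then
    match prev with
    | some p => d.insert (String.ofList [p, p]) (d.getD (String.ofList [p, p]) 0 + (run - 1))
    | none => d
  else d

def pvRunLoop (d : PySem.Dict String Int) (prev : Option Char) (run : Int) :
    List Char → PySem.Dict String Int
  | [] => pvFlush d prev run
  | ch :: rest =>
      if some ch = prev then pvRunLoop d prev (run + 1) rest
      else pvRunLoop (pvFlush d prev run) (some ch) 1 rest

def numberOfRepetitionsOfCharacterPairs_alt (text : String) : List (String × Int) :=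
  (pvRunLoop PySem.Dict.empty none 0 text.toList).items

-- ===== PRECONDITION & SPEC =====
def Spec_numberOfRepetitionsOfCharacterPairs (text : String) (out : List (String × Int)) : Prop := out = numberOfRepetitionsOfCharacterPairs_alt text
instance (text : String) (out : List (String × Int)) : Decidable (Spec_numberOfRepetitionsOfCharacterPairs text out) := by unfold Spec_numberOfRepetitionsOfCharacterPairs; infer_instance

-- ===== CLAIM (what is proved, stated in full; the proofs are below) =====
def Claim_equal_numberOfRepetitionsOfCharacterPairs : Prop := ∀ (text : String), Dom_numberOfRepetitionsOfCharacterPairs text → Spec_numberOfRepetitionsOfCharacterPairs text (numberOfRepetitionsOfCharacterPairs text)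

-- ===== LEMMAS AND PROOFS =====

-- the list of doubled adjacent pairs, structurally
def pairList : List Char → List String
  | a :: b :: t => if a = b then String.ofList [a, a] :: pairList (b :: t) else pairList (b :: t)
  | _ => []

-- the counting fold (each pair bumps its dict entry by one)
def pvCnt (d : PySem.Dict String Int) (l : List String) : PySem.Dict String Int :=
  l.foldl (fun d s => d.modify s 0 (· + 1)) d

theorem pvCnt_append (d : PySem.Dict String Int) (l₁ l₂ : List String) :
    pvCnt d (l₁ ++ l₂) = pvCnt (pvCnt d l₁) l₂ := List.foldl_append

-- A's if-branching counting step is exactly `modify`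
theorem countStep_eq (r : PySem.Dict String Int) (p : String) :
    (if r.contains p then r.modify p 0 (· + 1) else r.insert p 1) = r.modify p 0 (· + 1) := by
  by_cases h : r.contains p = true
  · simp [h]
  · have hf : r.contains p = false := by simpa using h
    rw [if_neg (by simp [hf]), PySem.Dict.modify, PySem.Dict.getD_of_not_contains r 0 hf]
    norm_num

-- Prop-condition version of foldl_append_if
theorem foldl_append_if_prop {α β : Type} (p : α → Prop) [DecidablePred p] (f : α → β) :
    ∀ (l : List α) (acc : List β),
      l.foldl (fun acc x => if p x then acc ++ [f x] else acc) acc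
        = acc ++ (l.filter (fun x => decide (p x))).map f := by
  intro l
  induction l with
  | nil => simp
  | cons a t ih =>
    intro acc
    by_cases h : p a <;> simp [List.foldl_cons, h, ih]

-- index-based doubled-pair list equals the structural one
theorem pairsIdx_eq_pairList : ∀ (cs : List Char),
    ((List.range cs.length).filter
        (fun (k : Nat) => decide (((k : Int) + 1 < (cs.length : Int)) ∧ cs[k]? = cs[k + 1]?))).map
      (fun (k : Nat) => String.ofList ((cs.drop k).take 2)) = pairList cs := by
  intro cs
  induction cs with
  | nil => simp [pairList]
  | cons a t ih =>
    cases t with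
    | nil => simp [pairList]
    | cons b u =>
      rw [show (a :: b :: u).length = (b :: u).length + 1 from rfl, List.range_succ_eq_map,
          List.filter_cons, List.filter_map]
      have hcomp : ((fun (k : Nat) => decide (((k : Int) + 1 < (((b :: u).length + 1 : Nat) : Int)) ∧
            (a :: b :: u)[k]? = (a :: b :: u)[k + 1]?)) ∘ Nat.succ)
          = (fun (k : Nat) => decide (((k : Int) + 1 < (((b :: u).length : Nat) : Int)) ∧
            (b :: u)[k]? = (b :: u)[k + 1]?)) := by
        funext k
        simp only [Function.comp, Nat.succ_eq_add_one]
        congr 1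
        have e1 : (((k + 1 : Nat) : Int) + 1 < (((b :: u).length + 1 : Nat) : Int))
            ↔ ((k : Int) + 1 < (((b :: u).length : Nat) : Int)) := by
          push_cast
          omega
        have e2 : ((a :: b :: u)[k + 1]? = (a :: b :: u)[k + 1 + 1]?)
            ↔ ((b :: u)[k]? = (b :: u)[k + 1]?) := by
          simp [List.getElem?_cons_succ]
        rw [e1, e2]
      rw [hcomp]
      have hcond : (decide ((((0 : Nat) : Int) + 1 < (((b :: u).length + 1 : Nat) : Int)) ∧
          (a :: b :: u)[(0 : Nat)]? = (a :: b :: u)[0 + 1]?) = true) ↔ a = b := by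
        simp
      by_cases hab : a = b
      · subst hab
        rw [if_pos (hcond.mpr rfl), List.map_cons, List.map_map, pairList, if_pos rfl, ← ih]
        rfl
      · rw [if_neg (fun h => hab (hcond.mp h)), List.map_map, pairList, if_neg hab, ← ih]
        rfl

-- the comprehension computes the structural pair list
theorem listOfDoubleCharacters_eq (text : String) :
    pvListOfDoubleCharacters text = pairList text.toList := by
  unfold pvListOfDoubleCharacters
  rw [foldl_append_if_prop
      (fun i => i + 1 < PySem.Str.len text ∧ PySem.Str.pyGet? text i = PySem.Str.pyGet? text (i + 1))
      (fun i => PySem.Str.slice text (some i) (some (i + 2)))]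
  rw [List.nil_append, show PySem.Str.len text = ((text.toList.length : Nat) : Int) from by
        simp [PySem.Str.len],
      PySem.List.pyRange_zero_nat, List.filter_map, List.map_map]
  rw [← pairsIdx_eq_pairList text.toList]
  congr 1
  · funext k
    simp only [Function.comp]
    apply String.toList_inj.mp
    rw [PySem.Str.toList_slice,
        show ((k : Int) + 2) = ((k : Int) + ((2 : Nat) : Int)) from by push_cast; ring,
        PySem.Chars.slice_eq_listSlice]
    rw [String.toList_ofList]
    exact PySem.List.slice_natCast_add text.toList k 2
  · congr 1
    funext k
    simp only [Function.comp]
    congr 1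
    rw [PySem.Str.pyGet?_natCast,
        show ((k : Int) + 1) = (((k + 1 : Nat)) : Int) from by push_cast; ring,
        PySem.Str.pyGet?_natCast]

-- A computes the count of the structural pair list
theorem A_eq_cnt (text : String) :
    numberOfRepetitionsOfCharacterPairs text
      = (pvCnt PySem.Dict.empty (pairList text.toList)).items := by
  unfold numberOfRepetitionsOfCharacterPairs
  rw [listOfDoubleCharacters_eq]
  congr 1
  show _ = pvCnt PySem.Dict.empty (pairList text.toList)
  unfold pvCnt
  congr 1
  funext r p
  exact countStep_eq r p

-- counting m copies of one key
theorem cnt_replicate (m : Nat) (d : PySem.Dict String Int) (s : String) :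
    pvCnt d (List.replicate m s)
      = if m = 0 then d else d.insert s (d.getD s 0 + (m : Int)) := by
  induction m generalizing d with
  | zero => simp [pvCnt]
  | succ m ih =>
    rw [List.replicate_succ]
    show pvCnt (d.modify s 0 (· + 1)) (List.replicate m s) = _
    rw [ih, if_neg (Nat.succ_ne_zero m)]
    by_cases hm : m = 0
    · subst hm
      rw [if_pos rfl]
      simp [PySem.Dict.modify]
    · rw [if_neg hm, PySem.Dict.modify, PySem.Dict.insert_insert_self,
          PySem.Dict.getD_insert_self]
      congr 1
      push_cast
      ring

-- a maximal run of length r contributes r-1 copies of its doubled pair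
theorem pairList_run : ∀ (r : Nat) (p : Char) (rest : List Char), 1 ≤ r →
    rest.head? ≠ some p →
    pairList (List.replicate r p ++ rest)
      = List.replicate (r - 1) (String.ofList [p, p]) ++ pairList rest := by
  intro r
  induction r with
  | zero => intro p rest h; omega
  | succ r ih =>
    intro p rest _ hrest
    by_cases hr : r = 0
    · subst hr
      cases rest with
      | nil => rfl
      | cons c t =>
        have hcp : ¬ p = c := fun h => hrest (by simp [h])
        rw [show List.replicate (0 + 1) p ++ (c :: t) = p :: c :: t from rfl,
            pairList, if_neg hcp]
        rfl
    · have h1r : 1 ≤ r := by omega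
      rw [List.replicate_succ, List.cons_append]
      obtain ⟨X, hX⟩ : ∃ X, List.replicate r p ++ rest = p :: X := by
        cases r with
        | zero => omega
        | succ k => exact ⟨List.replicate k p ++ rest, by rw [List.replicate_succ, List.cons_append]⟩
      rw [hX, pairList, if_pos rfl, ← hX, ih p rest h1r hrest]
      rw [show r + 1 - 1 = (r - 1) + 1 by omega, List.replicate_succ, List.cons_append]

-- main invariant of B's run loop
theorem runLoop_inv : ∀ (rest : List Char) (d : PySem.Dict String Int) (p : Char) (r : Nat),
    1 ≤ r →
    pvRunLoop d (some p) (r : Int) rest = pvCnt d (pairList (List.replicate r p ++ rest)) := by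
  intro rest
  induction rest with
  | nil =>
    intro d p r hr
    rw [pvRunLoop, pvFlush, pairList_run r p [] hr (by simp),
        show pairList [] = [] from rfl, List.append_nil, cnt_replicate]
    by_cases h2 : 2 ≤ r
    · rw [if_pos (by exact_mod_cast (by omega : (2 : Int) ≤ (r : Int))),
          if_neg (by omega : ¬ (r - 1 = 0))]
      congr 1
      push_cast [Nat.cast_sub hr]
      ring
    · have hr1 : r = 1 := by omega
      subst hr1
      rw [if_neg (by norm_num), if_pos rfl]
  | cons c t ih =>
    intro d p r hr
    rw [pvRunLoop]
    by_cases hcp : some c = some p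
    · rw [if_pos hcp]
      have hc : c = p := by injection hcp
      subst hc
      rw [show (r : Int) + 1 = ((r + 1 : Nat) : Int) from by push_cast; ring,
          ih d c (r + 1) (by omega),
          show List.replicate (r + 1) c ++ t = List.replicate r c ++ c :: t from by
            rw [List.replicate_succ', List.append_assoc]; rfl]
    · rw [if_neg hcp]
      have h1 := ih (pvFlush d (some p) (r : Int)) c 1 (le_refl 1)
      norm_num at h1
      rw [h1, pairList_run r p (c :: t) hr
            (by simpa using fun h => hcp (by rw [h])),
          pvCnt_append, cnt_replicate]
      congr 1
      rw [pvFlush]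
      by_cases h2 : 2 ≤ (r : Int)
      · rw [if_pos h2, if_neg (by omega : ¬ (r - 1 = 0))]
        congr 1
        push_cast [Nat.cast_sub hr]
        ring
      · rw [if_neg h2, if_pos (by omega : r - 1 = 0)]

-- B computes the count of the structural pair list as well
theorem alt_eq_cnt (text : String) :
    numberOfRepetitionsOfCharacterPairs_alt text
      = (pvCnt PySem.Dict.empty (pairList text.toList)).items := by
  unfold numberOfRepetitionsOfCharacterPairs_alt
  congr 1
  cases hcs : text.toList with
  | nil => rw [pvRunLoop, pvFlush, if_neg (by norm_num)]; rfl
  | cons c t =>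
    rw [pvRunLoop, if_neg (by simp),
        show pvFlush PySem.Dict.empty none 0 = PySem.Dict.empty from by
          rw [pvFlush, if_neg (by norm_num)]]
    exact runLoop_inv t PySem.Dict.empty c 1 (le_refl 1)

-- ===== VERDICT (by name: the statement is the Claim_ definition above) =====
theorem numberOfRepetitionsOfCharacterPairs_spec : Claim_equal_numberOfRepetitionsOfCharacterPairs := by
  intro text _
  show numberOfRepetitionsOfCharacterPairs text = numberOfRepetitionsOfCharacterPairs_alt text
  rw [A_eq_cnt, alt_eq_cnt]
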